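-- pv_equiv track=rewrite | github.com/gabreek/qt-yascrcpygui | gui/scrcpy_tab.py | _build_codec_options
-- ===== SOURCE A (Python) =====
-- CODEC_AUTO = "Auto"
--
-- def _build_codec_options(enc_map):
--     opts = [CODEC_AUTO]
--     if not isinstance(enc_map, dict): return opts
--     for codec, entries in sorted(enc_map.items()):
--         modes = sorted(list({m for _, m in entries}))
--         for mode in modes:
--             opts.append(f"{mode.upper()} - {codec}")
--     return opts
-- ===== SOURCE B (Python) =====
-- CODEC_AUTO = "Auto"
--
-- def _build_codec_options(enc_map):
--     if not isinstance(enc_map, dict):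
--         return [CODEC_AUTO]
--     pairs = {(codec, m) for codec, entries in enc_map.items() for _, m in entries}
--     return [CODEC_AUTO] + [f"{m.upper()} - {codec}" for codec, m in sorted(pairs)]
-- ===== Notes on version B (the rewrite author's own statement) =====
-- stated objective: simpler
-- what changed: Replaces the nested per-codec loop (each building and sorting its own mode set) by one global set comprehension of (codec, mode) pairs, a single lexicographic sort, and one flat formatting pass.
import Mathlib
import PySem

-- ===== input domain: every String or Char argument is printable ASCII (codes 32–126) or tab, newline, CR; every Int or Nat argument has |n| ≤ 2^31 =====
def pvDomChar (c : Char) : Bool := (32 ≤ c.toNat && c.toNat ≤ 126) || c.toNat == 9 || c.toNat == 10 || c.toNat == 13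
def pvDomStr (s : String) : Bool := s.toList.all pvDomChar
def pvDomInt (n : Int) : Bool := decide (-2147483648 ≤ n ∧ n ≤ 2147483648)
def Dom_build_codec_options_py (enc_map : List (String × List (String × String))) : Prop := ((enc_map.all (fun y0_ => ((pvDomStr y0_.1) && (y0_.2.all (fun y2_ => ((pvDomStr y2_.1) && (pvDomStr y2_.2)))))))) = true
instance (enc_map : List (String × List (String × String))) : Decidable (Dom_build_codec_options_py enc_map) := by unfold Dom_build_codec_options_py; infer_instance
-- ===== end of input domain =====

-- B replaces A's nested per-codec dedup-and-sort loops by one global set of (codec, mode)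
-- pairs sorted once lexicographically and formatted in a single flat pass (objective: simpler).

-- f"{mode.upper()} - {codec}" (shared formatting helper of both ports)
def pvFmt (mode codec : String) : String := PySem.Str.upper mode ++ " - " ++ codec

-- ===== PORT A =====
-- enc_map is the dict parameter as an association list; PySem.Dict.ofList is Python's dict
-- construction (insertion order, later duplicate keys overwrite in place).
-- sorted(enc_map.items()): dict keys are distinct, so Python's tuple comparison orders the
-- items by the codec key alone (the second component is never compared); ported as a
-- (stable) sort by the first component, exact because the keys are Nodup.
def build_codec_options_py (enc_map : List (String × List (String × String))) : List String :=
  let d := PySem.Dict.ofList enc_map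
  (PySem.List.sorted d.items (fun p => p.1) false).foldl
    (fun opts p =>
      let modes := PySem.List.sorted (PySem.Set.ofList (p.2.map (fun e => e.2))) (fun m => m) false
      modes.foldl (fun opts mode => opts ++ [pvFmt mode p.1]) opts)
    ["Auto"]

-- ===== PORT B =====
-- the set comprehension over all items, then one lexicographic sort (sorted on 2-tuples =
-- PySem.List.sorted2 on the two components), then one formatting pass.
def build_codec_options_py_alt (enc_map : List (String × List (String × String))) : List String :=
  let d := PySem.Dict.ofList enc_map
  let pairs := PySem.Set.ofList (d.items.flatMap (fun p => p.2.map (fun e => (p.1, e.2))))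
  ["Auto"] ++ (PySem.List.sorted2 pairs (fun q => q.1) (fun q => q.2) false).map (fun q => pvFmt q.2 q.1)

-- ===== PRECONDITION & SPEC =====
def Spec_build_codec_options_py (enc_map : List (String × List (String × String))) (out : List String) : Prop := out = build_codec_options_py_alt enc_map
instance (enc_map : List (String × List (String × String))) (out : List String) : Decidable (Spec_build_codec_options_py enc_map out) := by unfold Spec_build_codec_options_py; infer_instance

-- ===== CLAIM (what is proved, stated in full; the proofs are below) =====
def Claim_equal_build_codec_options_py : Prop := ∀ (enc_map : List (String × List (String × String))), Dom_build_codec_options_py enc_map → Spec_build_codec_options_py enc_map (build_codec_options_py enc_map)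

-- ===== LEMMAS AND PROOFS =====

-- sorted2's pairwise boolean test is exactly '<' of the lexicographic product order
theorem pvLexTest (a b : String × String) :
    (decide (a.1 < b.1) || (!decide (b.1 < a.1) && decide (a.2 < b.2)))
      = decide (toLex a < toLex b) := by
  rcases lt_trichotomy a.1 b.1 with h | h | h
  · simp [Prod.Lex.lt_iff, h, lt_asymm h]
  · simp [Prod.Lex.lt_iff, h]
  · simp [Prod.Lex.lt_iff, h, lt_asymm h, h.ne']

-- sorted2 with the two projections is sorted with the lexicographic key
theorem pvSorted2_eq_sorted_lex (xs : List (String × String)) :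
    PySem.List.sorted2 xs (fun q => q.1) (fun q => q.2) false
      = PySem.List.sorted xs (fun q => toLex q) false := by
  rw [PySem.List.sorted_eq_foldl_insertBy]
  simp only [PySem.List.sorted2, if_neg (by decide : ¬ (false = true))]
  have h : (fun a b : String × String =>
      decide (a.1 < b.1) || (!decide (b.1 < a.1) && decide (a.2 < b.2)))
      = fun a b => decide (toLex a < toLex b) := by
    funext a b; exact pvLexTest a b
  rw [h]

-- ===== VERDICT (by name: the statement is the Claim_ definition above) =====

theorem build_codec_options_py_spec : Claim_equal_build_codec_options_py := by
  intro enc_map _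
  unfold Spec_build_codec_options_py build_codec_options_py build_codec_options_py_alt
  simp only []
  set items := (PySem.Dict.ofList enc_map).items with hitems
  -- distinct codec keys
  have hnd : (items.map Prod.fst).Nodup := PySem.Dict.nodup_keys_ofList enc_map
  set S := PySem.List.sorted items (fun p => p.1) false with hS
  -- the per-codec blocks of sorted (codec, mode) pairs, in A's emission order
  set G : List (String × String) := S.flatMap
      (fun p => (PySem.List.sorted (PySem.Set.ofList (p.2.map (fun e => e.2))) (fun m => m) false).map
        (fun m => (p.1, m))) with hG
  set P : List (String × String) :=
      PySem.Set.ofList (items.flatMap (fun p => p.2.map (fun e => (p.1, e.2)))) with hP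
  -- A's nested loops emit ["Auto"] ++ G.map fmt
  have hA : (PySem.List.sorted items (fun p => p.1) false).foldl
      (fun opts p =>
        (PySem.List.sorted (PySem.Set.ofList (p.2.map (fun e => e.2))) (fun m => m) false).foldl
          (fun opts mode => opts ++ [pvFmt mode p.1]) opts)
      ["Auto"] = ["Auto"] ++ G.map (fun q => pvFmt q.2 q.1) := by
    simp only [PySem.List.foldl_append_singleton_eq_map, PySem.List.foldl_append_eq_flatMap,
      hG, List.map_flatMap, List.map_map, Function.comp_def, ← hS]
  rw [hA, pvSorted2_eq_sorted_lex]
  -- codecs strictly increase along S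
  have hSfstlt : S.Pairwise (fun p q => p.1 < q.1) := by
    have h1 : S.Pairwise (fun p q => p.1 ≤ q.1) := PySem.List.sorted_pairwise items (fun p => p.1)
    have h2 : (S.map Prod.fst).Nodup :=
      hnd.perm ((PySem.List.sorted_perm items (fun p => p.1) false).map Prod.fst).symm
    have h2' : S.Pairwise (fun p q => p.1 ≠ q.1) := (List.pairwise_map).1 h2
    exact (h1.and h2').imp (fun h => lt_of_le_of_ne h.1 h.2)
  -- G is strictly increasing in the lexicographic key
  have hGpw : G.Pairwise (fun a b : String × String => toLex a < toLex b) := by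
    rw [hG, List.pairwise_flatMap]
    constructor
    · intro p _
      have := PySem.List.sorted_ofList_pairwise_lt (p.2.map (fun e => e.2))
      rw [List.pairwise_map]
      exact this.imp (fun h => by simp [Prod.Lex.lt_iff, h])
    · refine hSfstlt.imp ?_
      intro p q h x hx y hy
      rcases List.mem_map.1 hx with ⟨m, _, rfl⟩
      rcases List.mem_map.1 hy with ⟨m', _, rfl⟩
      simp [Prod.Lex.lt_iff, h]
  -- G is a rearrangement of the pair set P
  have hperm : G.Perm P := by
    have hGnd : G.Nodup := hGpw.imp (fun h => by
      intro he; exact absurd (congrArg toLex he) (ne_of_lt h))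
    have hPnd : P.Nodup := PySem.Set.nodup_ofList _
    refine (List.perm_ext_iff_of_nodup hGnd hPnd).2 ?_
    intro q
    rw [hG, hP]
    simp only [List.mem_flatMap, List.mem_map, PySem.List.mem_sorted, PySem.Set.mem_ofList]
    have hmemS : ∀ p, p ∈ S ↔ p ∈ items :=
      fun p => PySem.List.mem_sorted items (fun p => p.1) false p
    constructor
    · rintro ⟨p, hp, m, ⟨e, he, rfl⟩, rfl⟩
      exact ⟨p, (hmemS p).1 hp, e, he, rfl⟩
    · rintro ⟨p, hp, e, he, rfl⟩
      exact ⟨p, (hmemS p).2 hp, e.2, ⟨e, he, rfl⟩, rfl⟩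
  rw [PySem.List.sorted_eq_of_perm_of_pairwise_lt P G (fun q => toLex q) hperm hGpw]
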